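-- pv_equiv track=rewrite | github.com/dojo-natal/dojo-natal | 2020/20200311_colonia_de_formigas/colonia_de_formigas.py | colonia_de_formigas
-- ===== SOURCE A (Python) =====
-- def colonia_de_formigas(tuneis, queries):
--     def make_formigueiros(tuneis):
--         formigueiros = {}
--         for tunel in tuneis:
--             formigueiros[tunel[0]] = (tunel[1], tunel[2])
--         return formigueiros
--
--     formigueiros = make_formigueiros(tuneis)
--
--     def walk(inicio, destino_final):
--         if inicio not in formigueiros.keys():
--             return 0
--         destino = formigueiros[inicio][0]
--         distancia = formigueiros[inicio][1]
--         return distancia + walk(destino, destino_final)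
--
--     return walk(queries[0][0], queries[0][1])
-- ===== SOURCE B (Python) =====
-- def colonia_de_formigas(tuneis, queries):
--     # No dict at all: walk the chain by scanning the tunnel list in reverse
--     # (last entry for a source node wins, matching dict-overwrite semantics),
--     # accumulating distances until the current node has no outgoing tunnel.
--     no = queries[0][0]
--     total = 0
--     while True:
--         for a, b, d in reversed(tuneis):
--             if a == no:
--                 total += d
--                 no = b
--                 break
--         else:
--             return total
-- ===== Notes on version B (the rewrite author's own statement) =====
-- stated objective: alternative
-- what changed: B drops the dict and the recursive walk entirely: it walks the chain iteratively with an accumulator, finding each step's tunnel by a reversed linear scan of the tunnel list (first match in reverse = last entry, matching dict overwrite).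
import Mathlib
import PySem

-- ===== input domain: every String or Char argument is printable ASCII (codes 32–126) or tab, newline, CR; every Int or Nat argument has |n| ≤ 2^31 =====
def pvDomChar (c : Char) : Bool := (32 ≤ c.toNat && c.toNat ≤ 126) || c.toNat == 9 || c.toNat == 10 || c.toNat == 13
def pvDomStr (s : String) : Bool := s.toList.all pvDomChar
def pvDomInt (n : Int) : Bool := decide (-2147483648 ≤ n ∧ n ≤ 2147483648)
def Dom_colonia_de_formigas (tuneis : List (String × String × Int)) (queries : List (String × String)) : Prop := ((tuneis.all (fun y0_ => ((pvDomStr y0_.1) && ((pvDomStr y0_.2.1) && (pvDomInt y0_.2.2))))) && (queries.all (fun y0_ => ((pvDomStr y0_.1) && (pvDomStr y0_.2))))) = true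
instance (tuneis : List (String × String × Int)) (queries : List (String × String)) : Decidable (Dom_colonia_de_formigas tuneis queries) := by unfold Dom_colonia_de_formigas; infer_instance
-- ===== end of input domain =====

-- B drops the dict and the recursion entirely: an iterative accumulator walk whose lookup is a
-- reversed linear scan of the raw tunnel list (last entry for a source wins = dict overwrite).
-- In Lean both walks carry a fuel bound (tuneis.length + 1 steps suffice whenever the Python
-- terminates) purely to make them total; Pre_ excludes the inputs where Python A raises.

-- ===== PORT A =====
-- make_formigueiros: builds the dict node -> (next, distance)
def mkFormigueiros (tuneis : List (String × String × Int)) : PySem.Dict String (String × Int) :=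
  tuneis.foldl (fun d t => d.insert t.1 (t.2.1, t.2.2)) PySem.Dict.empty

-- walk(inicio, _): 'if inicio not in formigueiros: return 0; return dist + walk(next)'.
-- Fuel only makes the recursion total; with fuel ≥ chain length it computes exactly A's walk.
def walkA (d : PySem.Dict String (String × Int)) : Nat → String → Int
  | 0, _ => 0
  | fuel + 1, inicio =>
    match d.get? inicio with
    | none => 0
    | some (destino, distancia) => distancia + walkA d fuel destino

def colonia_de_formigas (tuneis : List (String × String × Int)) (queries : List (String × String)) : Int :=
  let formigueiros := mkFormigueiros tuneis
  match PySem.List.pyGet? queries 0 with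
  | none => 0  -- queries[0] raises IndexError in Python; excluded by Pre_
  | some q => walkA formigueiros (tuneis.length + 1) q.1

-- ===== PORT B =====
-- the inner 'for a, b, d in reversed(tuneis): if a == no: … break / else: …':
-- first match in the (already reversed) list
def scanB (rev : List (String × String × Int)) (no : String) : Option (String × Int) :=
  match rev with
  | [] => none
  | t :: rest => if t.1 == no then some (t.2.1, t.2.2) else scanB rest no

-- the 'while True' loop: on a match add the distance and advance, otherwise return total
-- (fuel for totality only)
def loopB (rev : List (String × String × Int)) : Nat → String → Int → Int
  | 0, _, total => total
  | fuel + 1, no, total =>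
    match scanB rev no with
    | none => total
    | some (b, d) => loopB rev fuel b (total + d)

def colonia_de_formigas_alt (tuneis : List (String × String × Int)) (queries : List (String × String)) : Int :=
  let rev := tuneis.reverse
  match PySem.List.pyGet? queries 0 with
  | none => 0  -- queries[0] raises IndexError in Python; excluded by Pre_
  | some q => loopB rev (tuneis.length + 1) q.1 0

-- ===== PRECONDITION & SPEC =====
-- true iff the tunnel chain starting at s leaves the dict within the given number of steps
def chainEscapes (d : PySem.Dict String (String × Int)) : Nat → String → Bool
  | 0, s => (d.get? s).isNone
  | n + 1, s =>
    match d.get? s with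
    | none => true
    | some (nxt, _) => chainEscapes d n nxt

-- Pre_: queries is nonempty (else A raises IndexError on queries[0]) and the tunnel chain from
-- the start node reaches a node with no outgoing tunnel (else A's recursion never terminates and
-- raises RecursionError; B's while loop diverges there too). Exactly the inputs A returns on.
def Pre_colonia_de_formigas (tuneis : List (String × String × Int)) (queries : List (String × String)) : Prop :=
  queries ≠ [] ∧
  ∀ q ∈ PySem.List.pyGet? queries 0, chainEscapes (mkFormigueiros tuneis) tuneis.length q.1 = true
instance (tuneis : List (String × String × Int)) (queries : List (String × String)) : Decidable (Pre_colonia_de_formigas tuneis queries) := by unfold Pre_colonia_de_formigas; infer_instance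

def pvWitness_colonia_de_formigas : (List (String × String × Int)) × (List (String × String)) :=
  ([("a", "b", 3), ("b", "c", 4)], [("a", "c")])

def Spec_colonia_de_formigas (tuneis : List (String × String × Int)) (queries : List (String × String)) (out : Int) : Prop := out = colonia_de_formigas_alt tuneis queries
instance (tuneis : List (String × String × Int)) (queries : List (String × String)) (out : Int) : Decidable (Spec_colonia_de_formigas tuneis queries out) := by unfold Spec_colonia_de_formigas; infer_instance

-- ===== CLAIM (what is proved, stated in full; the proofs are below) =====
def Claim_equal_colonia_de_formigas : Prop := ∀ (tuneis : List (String × String × Int)) (queries : List (String × String)), Dom_colonia_de_formigas tuneis queries → Pre_colonia_de_formigas tuneis queries → Spec_colonia_de_formigas tuneis queries (colonia_de_formigas tuneis queries)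

-- ===== LEMMAS AND PROOFS =====

-- reversed-scan distributes over append: first match wins
theorem scanB_append (l1 l2 : List (String × String × Int)) (s : String) :
    scanB (l1 ++ l2) s = (scanB l1 s).or (scanB l2 s) := by
  induction l1 with
  | nil => simp [scanB]
  | cons t rest ih =>
    simp only [List.cons_append, scanB, ih]
    split_ifs <;> simp

-- the dict built by the insert loop looks up exactly what the reversed scan finds
theorem get?_mkFormigueiros (tuneis : List (String × String × Int)) (s : String) :
    (mkFormigueiros tuneis).get? s = scanB tuneis.reverse s := by
  suffices h : ∀ (l : List (String × String × Int)) (d : PySem.Dict String (String × Int)),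
      (l.foldl (fun d t => d.insert t.1 (t.2.1, t.2.2)) d).get? s = (scanB l.reverse s).or (d.get? s) by
    have := h tuneis PySem.Dict.empty
    simpa [PySem.Dict.get?_empty] using this
  intro l
  induction l with
  | nil => intro d; simp [scanB]
  | cons t rest ih =>
    intro d
    simp only [List.foldl_cons, List.reverse_cons, scanB_append, ih]
    cases hr : scanB rest.reverse s with
    | some v => simp
    | none =>
      simp only [Option.none_or]
      rw [PySem.Dict.get?_insert]
      simp only [scanB]
      by_cases h : t.1 = s
      · simp [h]
      · simp [h, Ne.symm h]

-- with equal fuel, B's accumulator loop computes acc + A's recursive walk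
theorem loopB_eq_walkA (tuneis : List (String × String × Int)) :
    ∀ (fuel : Nat) (s : String) (acc : Int),
      loopB tuneis.reverse fuel s acc = acc + walkA (mkFormigueiros tuneis) fuel s := by
  intro fuel
  induction fuel with
  | zero => intro s acc; simp [loopB, walkA]
  | succ n ih =>
    intro s acc
    simp only [loopB, walkA, get?_mkFormigueiros]
    cases h : scanB tuneis.reverse s with
    | none => simp
    | some p => cases p with
      | mk nxt dist => simp only []; rw [ih]; ring

-- ===== VERDICT (by name: the statement is the Claim_ definition above) =====
theorem colonia_de_formigas_spec : Claim_equal_colonia_de_formigas := by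
  intro tuneis queries _ _
  unfold Spec_colonia_de_formigas colonia_de_formigas colonia_de_formigas_alt
  cases PySem.List.pyGet? queries 0 with
  | none => rfl
  | some q => simp [loopB_eq_walkA]
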